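-- pv_equiv track=rewrite | github.com/spritelab/5GSniffer | scripts/reverse_scrambler.py | pseudo_random_sequence
-- ===== SOURCE A (Python) =====
-- gold_sequence_length = 31
--
-- Nc = 1600
--
-- def pseudo_random_sequence(seq_length, c_init):
--   c_init = c_init & 0xffffffff
--   size_x = seq_length + gold_sequence_length + Nc
--
--   x1 = [0] * size_x
--   x2 = [0] * size_x
--   c = [0] * seq_length
--
--   x1[0] = 1
--
--   for n in range(0, gold_sequence_length):
--     x2[n] = (c_init >> n) & 0x1
--
--   for n in range(0, Nc + seq_length):
--     x1[n+31] = (x1[n+3] + x1[n]) % 2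
--     x2[n+31] = (x2[n+3] + x2[n+2] + x2[n+1] + x2[n]) % 2
--
--   for n in range(0, seq_length):
--     c[n] = (x1[n+Nc] + x2[n+Nc]) % 2
--
--   return c
-- ===== SOURCE B (Python) =====
-- gold_sequence_length = 31
--
-- Nc = 1600
--
-- def _step1(w):
--   return w[1:] + [(w[3] + w[0]) % 2]
--
-- def _step2(w):
--   return w[1:] + [(w[3] + w[2] + w[1] + w[0]) % 2]
--
-- def pseudo_random_sequence(seq_length, c_init):
--   # Sliding 31-bit windows over the two LFSR streams (constant memory)
--   # instead of O(Nc + seq_length)-sized history arrays.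
--   c_init = c_init & 0xffffffff
--   w1 = [1] + [0] * 30
--   w2 = [(c_init >> n) & 0x1 for n in range(gold_sequence_length)]
--   for _ in range(Nc):
--     w1 = _step1(w1)
--     w2 = _step2(w2)
--   c = []
--   for _ in range(seq_length):
--     c.append((w1[0] + w2[0]) % 2)
--     w1 = _step1(w1)
--     w2 = _step2(w2)
--   return c
-- ===== Notes on version B (the rewrite author's own statement) =====
-- stated objective: alternative
-- what changed: B replaces A's three passes over O(Nc+seq_length)-sized history arrays x1/x2 by two sliding 31-bit windows advanced step by step in constant memory, emitting each output bit as it goes.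
import Mathlib
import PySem

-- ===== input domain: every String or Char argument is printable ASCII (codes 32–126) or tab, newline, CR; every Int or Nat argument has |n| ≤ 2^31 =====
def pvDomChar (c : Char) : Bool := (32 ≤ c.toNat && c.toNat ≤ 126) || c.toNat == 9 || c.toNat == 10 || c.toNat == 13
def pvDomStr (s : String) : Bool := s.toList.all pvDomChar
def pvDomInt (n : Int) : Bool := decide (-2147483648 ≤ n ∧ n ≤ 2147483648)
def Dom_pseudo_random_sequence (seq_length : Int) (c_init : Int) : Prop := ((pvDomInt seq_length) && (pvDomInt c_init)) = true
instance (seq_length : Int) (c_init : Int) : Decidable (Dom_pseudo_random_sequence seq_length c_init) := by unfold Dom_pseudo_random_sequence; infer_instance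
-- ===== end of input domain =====

-- B replaces A's three passes over O(Nc+seq_length)-sized history arrays by two sliding
-- 31-element windows advanced step by step in constant memory (objective: alternative).

-- ===== PORT A =====
-- gold_sequence_length = 31 and Nc = 1600 are inlined as literals.
-- Python list assignment xs[i] = v is ported as List.set i.toNat v and reads xs[i] as
-- PySem.List.pyGetD xs i 0: under Pre_ every index reached is nonnegative and in range,
-- where both are exact (out-of-range indices would raise IndexError and lie outside Pre_).
def pseudo_random_sequence (seq_length : Int) (c_init : Int) : List Int :=
  let ci := PySem.Int.band c_init 0xffffffff
  let size_x := seq_length + 31 + 1600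
  let x1 : List Int := List.replicate size_x.toNat 0
  let x2 : List Int := List.replicate size_x.toNat 0
  let c : List Int := List.replicate seq_length.toNat 0
  let x1 := x1.set 0 1
  let x2 := (PySem.List.pyRange 0 31 1).foldl
      (fun x2 n => x2.set n.toNat (PySem.Int.band (ci >>> n.toNat) 1)) x2
  let p := (PySem.List.pyRange 0 (1600 + seq_length) 1).foldl
      (fun (p : List Int × List Int) n =>
        (p.1.set (n + 31).toNat
           (PySem.Int.mod (PySem.List.pyGetD p.1 (n + 3) 0 + PySem.List.pyGetD p.1 n 0) 2),
         p.2.set (n + 31).toNat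
           (PySem.Int.mod (PySem.List.pyGetD p.2 (n + 3) 0 + PySem.List.pyGetD p.2 (n + 2) 0 +
                           PySem.List.pyGetD p.2 (n + 1) 0 + PySem.List.pyGetD p.2 n 0) 2)))
      (x1, x2)
  let c := (PySem.List.pyRange 0 seq_length 1).foldl
      (fun c n => c.set n.toNat
        (PySem.Int.mod (PySem.List.pyGetD p.1 (n + 1600) 0 + PySem.List.pyGetD p.2 (n + 1600) 0) 2)) c
  c

-- ===== PORT B =====
-- helper _step1 of Source B; w[1:] is PySem.List.slice w (some 1) none; w[j] is pyGetD (always in range: windows have length 31)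
def pvStep1 (w : List Int) : List Int :=
  PySem.List.slice w (some 1) none ++
    [PySem.Int.mod (PySem.List.pyGetD w 3 0 + PySem.List.pyGetD w 0 0) 2]

-- helper _step2 of Source B
def pvStep2 (w : List Int) : List Int :=
  PySem.List.slice w (some 1) none ++
    [PySem.Int.mod (PySem.List.pyGetD w 3 0 + PySem.List.pyGetD w 2 0 +
                    PySem.List.pyGetD w 1 0 + PySem.List.pyGetD w 0 0) 2]

def pseudo_random_sequence_alt (seq_length : Int) (c_init : Int) : List Int :=
  let ci := PySem.Int.band c_init 0xffffffff
  let w1 : List Int := [1] ++ List.replicate 30 0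
  let w2 : List Int := (PySem.List.pyRange 0 31 1).map (fun n => PySem.Int.band (ci >>> n.toNat) 1)
  let p := (PySem.List.pyRange 0 1600 1).foldl
      (fun (p : List Int × List Int) _ => (pvStep1 p.1, pvStep2 p.2)) (w1, w2)
  let q := (PySem.List.pyRange 0 seq_length 1).foldl
      (fun (q : List Int × List Int × List Int) _ =>
        (q.1 ++ [PySem.Int.mod (PySem.List.pyGetD q.2.1 0 0 + PySem.List.pyGetD q.2.2 0 0) 2],
         pvStep1 q.2.1, pvStep2 q.2.2)) ([], p.1, p.2)
  q.1

-- ===== PRECONDITION & SPEC =====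
-- A raises IndexError when seq_length < -1600 (the work arrays become shorter than the
-- 31-entry seed region); exactly those inputs are excluded.
def Pre_pseudo_random_sequence (seq_length : Int) (c_init : Int) : Prop := -1600 ≤ seq_length
instance (seq_length : Int) (c_init : Int) : Decidable (Pre_pseudo_random_sequence seq_length c_init) := by
  unfold Pre_pseudo_random_sequence; infer_instance

def pvWitness_pseudo_random_sequence : Int × Int := (5, 12345)

def Spec_pseudo_random_sequence (seq_length : Int) (c_init : Int) (out : List Int) : Prop :=
  out = pseudo_random_sequence_alt seq_length c_init
instance (seq_length : Int) (c_init : Int) (out : List Int) : Decidable (Spec_pseudo_random_sequence seq_length c_init out) := by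
  unfold Spec_pseudo_random_sequence; infer_instance

-- ===== CLAIM (what is proved, stated in full; the proofs are below) =====
def Claim_equal_pseudo_random_sequence : Prop := ∀ (seq_length : Int) (c_init : Int), Dom_pseudo_random_sequence seq_length c_init → Pre_pseudo_random_sequence seq_length c_init → Spec_pseudo_random_sequence seq_length c_init (pseudo_random_sequence seq_length c_init)

-- ===== LEMMAS AND PROOFS =====

-- the two LFSR streams, defined as iterates of B's window steps; pvS1/pvS2 are the stream values
def pvW1 : Nat → List Int
  | 0 => [1] ++ List.replicate 30 0
  | m + 1 => pvStep1 (pvW1 m)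

def pvW2 (ci : Int) : Nat → List Int
  | 0 => (PySem.List.pyRange 0 31 1).map (fun n => PySem.Int.band (ci >>> n.toNat) 1)
  | m + 1 => pvStep2 (pvW2 ci m)

def pvS1 (m : Nat) : Int := (pvW1 m).getD 0 0
def pvS2 (ci : Int) (m : Nat) : Int := (pvW2 ci m).getD 0 0

lemma pvW1_length (m : Nat) : (pvW1 m).length = 31 := by
  induction m with
  | zero => simp [pvW1]
  | succ m ih => simp [pvW1, pvStep1, PySem.List.slice_from_one, ih]

lemma pvW2_length (ci : Int) (m : Nat) : (pvW2 ci m).length = 31 := by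
  induction m with
  | zero => simp [pvW2, PySem.List.length_pyRange_one]
  | succ m ih => simp [pvW2, pvStep2, PySem.List.slice_from_one, ih]

lemma pv_tail_append_getD (w : List Int) (v : Int) (j : Nat) (h : j + 1 < w.length) :
    (w.tail ++ [v]).getD j 0 = w.getD (j + 1) 0 := by
  cases w with
  | nil => simp at h
  | cons a t =>
    simp only [List.tail_cons, List.getD_cons_succ]
    rw [List.getD_append]
    simp at h; omega

lemma pv_tail_append_last (w : List Int) (v : Int) (h : w.length = 31) :
    (w.tail ++ [v]).getD 30 0 = v := by
  have h30 : w.tail.length = 30 := by simp [h]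
  rw [List.getD_append_right w.tail [v] 0 30 (by omega)]
  simp [h30]

lemma pvW1_entry (j : Nat) (hj : j < 31) : ∀ m, (pvW1 m).getD j 0 = pvS1 (m + j) := by
  induction j with
  | zero => intro m; simp [pvS1]
  | succ j ih =>
    intro m
    have h1 : (pvW1 (m+1)).getD j 0 = pvS1 ((m+1) + j) := ih (by omega) (m+1)
    have h2 : (pvW1 (m+1)).getD j 0 = (pvW1 m).getD (j+1) 0 := by
      show (pvStep1 (pvW1 m)).getD j 0 = _
      rw [pvStep1, PySem.List.slice_from_one, pv_tail_append_getD _ _ _ (by rw [pvW1_length]; omega)]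
    rw [← h2, h1]; ring_nf

lemma pvW2_entry (ci : Int) (j : Nat) (hj : j < 31) : ∀ m, (pvW2 ci m).getD j 0 = pvS2 ci (m + j) := by
  induction j with
  | zero => intro m; simp [pvS2]
  | succ j ih =>
    intro m
    have h1 : (pvW2 ci (m+1)).getD j 0 = pvS2 ci ((m+1) + j) := ih (by omega) (m+1)
    have h2 : (pvW2 ci (m+1)).getD j 0 = (pvW2 ci m).getD (j+1) 0 := by
      show (pvStep2 (pvW2 ci m)).getD j 0 = _
      rw [pvStep2, PySem.List.slice_from_one, pv_tail_append_getD _ _ _ (by rw [pvW2_length]; omega)]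
    rw [← h2, h1]; ring_nf

lemma pvS1_rec (m : Nat) :
    pvS1 (m + 31) = PySem.Int.mod (pvS1 (m + 3) + pvS1 m) 2 := by
  have e : pvS1 (m + 31) = (pvW1 (m+1)).getD 30 0 := by
    rw [pvW1_entry 30 (by omega) (m+1)]
  rw [e]
  show (pvStep1 (pvW1 m)).getD 30 0 = _
  rw [pvStep1, PySem.List.slice_from_one, pv_tail_append_last _ _ (pvW1_length m)]
  have g3 : PySem.List.pyGetD (pvW1 m) 3 0 = (pvW1 m).getD 3 0 := by simp [pysem]
  have g0 : PySem.List.pyGetD (pvW1 m) 0 0 = (pvW1 m).getD 0 0 := by simp [pysem]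
  rw [g3, g0, pvW1_entry 3 (by omega) m, pvW1_entry 0 (by omega) m]
  simp only [Nat.add_zero]

lemma pvS2_rec (ci : Int) (m : Nat) :
    pvS2 ci (m + 31) = PySem.Int.mod (pvS2 ci (m + 3) + pvS2 ci (m + 2) +
                                      pvS2 ci (m + 1) + pvS2 ci m) 2 := by
  have e : pvS2 ci (m + 31) = (pvW2 ci (m+1)).getD 30 0 := by
    rw [pvW2_entry ci 30 (by omega) (m+1)]
  rw [e]
  show (pvStep2 (pvW2 ci m)).getD 30 0 = _
  rw [pvStep2, PySem.List.slice_from_one, pv_tail_append_last _ _ (pvW2_length ci m)]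
  have g3 : PySem.List.pyGetD (pvW2 ci m) 3 0 = (pvW2 ci m).getD 3 0 := by simp [pysem]
  have g2 : PySem.List.pyGetD (pvW2 ci m) 2 0 = (pvW2 ci m).getD 2 0 := by simp [pysem]
  have g1 : PySem.List.pyGetD (pvW2 ci m) 1 0 = (pvW2 ci m).getD 1 0 := by simp [pysem]
  have g0 : PySem.List.pyGetD (pvW2 ci m) 0 0 = (pvW2 ci m).getD 0 0 := by simp [pysem]
  rw [g3, g2, g1, g0, pvW2_entry ci 3 (by omega) m, pvW2_entry ci 2 (by omega) m,
      pvW2_entry ci 1 (by omega) m, pvW2_entry ci 0 (by omega) m]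
  simp only [Nat.add_zero]

lemma pvS1_seed (j : Nat) (hj : j < 31) : pvS1 j = if j = 0 then 1 else 0 := by
  have h := pvW1_entry j hj 0
  rw [Nat.zero_add] at h
  rw [← h]
  show ([1] ++ List.replicate 30 (0:Int)).getD j 0 = _
  cases j with
  | zero => simp
  | succ j =>
    have hrep : (List.replicate 30 (0:Int)).getD j 0 = 0 := by
      rw [List.getD_eq_getElem?_getD, List.getElem?_replicate]
      split <;> rfl
    rw [show [1] ++ List.replicate 30 (0:Int) = 1 :: List.replicate 30 0 from rfl,
        List.getD_cons_succ, hrep]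
    simp

lemma pvS2_seed (ci : Int) (j : Nat) (hj : j < 31) :
    pvS2 ci j = PySem.Int.band (ci >>> ((j : Int)).toNat) 1 := by
  have h := pvW2_entry ci j hj 0
  rw [Nat.zero_add] at h
  rw [← h]
  show ((PySem.List.pyRange 0 31).map (fun n => PySem.Int.band (ci >>> n.toNat) 1)).getD j 0 = _
  have h31 : (31 : Int) = ((31 : Nat) : Int) := by norm_num
  rw [h31, PySem.List.pyRange_zero_natCast, List.map_map,
      PySem.List.getD_map_range _ _ _ _ hj]
  simp [Int.shiftRight_natCast_right]

-- the 'for n in range(k): c[n] = f(n)' pattern in closed form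
lemma pv_foldl_set (f : Int → Int) (k : Nat) (init : List Int) (hk : k ≤ init.length) :
    (PySem.List.pyRange 0 (k : Int) 1).foldl (fun c n => c.set n.toNat (f n)) init
      = (List.range k).map (fun j : Nat => f (j : Int)) ++ init.drop k := by
  induction k with
  | zero => simp [PySem.List.pyRange_one_eq_nil]
  | succ k ih =>
    have hcast : ((k + 1 : Nat) : Int) = (k : Int) + 1 := by push_cast; ring
    rw [hcast, PySem.List.pyRange_one_succ_right (by positivity), List.foldl_append,
        ih (by omega)]
    simp only [List.foldl_cons, List.foldl_nil]
    rw [List.set_append_right _ _ (by simp)]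
    have hlt : k < init.length := by omega
    simp only [List.length_map, List.length_range, Int.toNat_natCast, Nat.sub_self]
    rw [List.drop_eq_getElem_cons hlt, List.set_cons_zero, List.range_succ]
    simp

-- B's warmup loop is iteration of the steps
lemma pvB_warm (ci : Int) (k : Nat) :
    (PySem.List.pyRange 0 (k : Int) 1).foldl
        (fun (p : List Int × List Int) _ => (pvStep1 p.1, pvStep2 p.2)) (pvW1 0, pvW2 ci 0)
      = (pvW1 k, pvW2 ci k) := by
  induction k with
  | zero => simp [PySem.List.pyRange_one_eq_nil]
  | succ k ih =>
    have hcast : ((k + 1 : Nat) : Int) = (k : Int) + 1 := by push_cast; ring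
    rw [hcast, PySem.List.pyRange_one_succ_right (by positivity), List.foldl_append, ih]
    simp [pvW1, pvW2]

-- B's output loop
lemma pvB_out (ci : Int) (k : Nat) :
    (PySem.List.pyRange 0 (k : Int) 1).foldl
        (fun (q : List Int × List Int × List Int) _ =>
          (q.1 ++ [PySem.Int.mod (PySem.List.pyGetD q.2.1 0 0 + PySem.List.pyGetD q.2.2 0 0) 2],
           pvStep1 q.2.1, pvStep2 q.2.2)) ([], pvW1 1600, pvW2 ci 1600)
      = ((List.range k).map (fun j => PySem.Int.mod (pvS1 (1600 + j) + pvS2 ci (1600 + j)) 2),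
         pvW1 (1600 + k), pvW2 ci (1600 + k)) := by
  induction k with
  | zero => simp [PySem.List.pyRange_one_eq_nil]
  | succ k ih =>
    have hcast : ((k + 1 : Nat) : Int) = (k : Int) + 1 := by push_cast; ring
    rw [hcast, PySem.List.pyRange_one_succ_right (by positivity), List.foldl_append, ih]
    simp only [List.foldl_cons, List.foldl_nil]
    have g1 : PySem.List.pyGetD (pvW1 (1600 + k)) 0 0 = pvS1 (1600 + k) := by
      simp [pysem, pvS1]
    have g2 : PySem.List.pyGetD (pvW2 ci (1600 + k)) 0 0 = pvS2 ci (1600 + k) := by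
      simp [pysem, pvS2]
    rw [g1, g2]
    have e1 : pvStep1 (pvW1 (1600 + k)) = pvW1 (1600 + (k + 1)) := by
      show _ = pvW1 ((1600 + k) + 1); rfl
    have e2 : pvStep2 (pvW2 ci (1600 + k)) = pvW2 ci (1600 + (k + 1)) := by
      show _ = pvW2 ci ((1600 + k) + 1); rfl
    rw [e1, e2, List.range_succ]
    simp

lemma pvB_closed (seq_length ci : Int) :
    pseudo_random_sequence_alt seq_length ci
      = (List.range seq_length.toNat).map
          (fun j => PySem.Int.mod (pvS1 (1600 + j) + pvS2 (PySem.Int.band ci 0xffffffff) (1600 + j)) 2) := by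
  unfold pseudo_random_sequence_alt
  dsimp only
  set m := PySem.Int.band ci 0xffffffff with hm
  rw [show ([1] ++ List.replicate 30 (0:Int)) = pvW1 0 from rfl,
      show ((PySem.List.pyRange 0 31).map (fun n => PySem.Int.band (m >>> n.toNat) 1)) = pvW2 m 0 from rfl]
  have h1600 : (1600 : Int) = ((1600 : Nat) : Int) := by norm_num
  rw [h1600, pvB_warm m 1600]
  by_cases hs : 0 ≤ seq_length
  · have hcast : seq_length = ((seq_length.toNat : Nat) : Int) := (Int.toNat_of_nonneg hs).symm
    rw [hcast, pvB_out m seq_length.toNat]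
    simp only [Int.toNat_natCast]
  · rw [PySem.List.pyRange_one_eq_nil (by omega)]
    have : seq_length.toNat = 0 := by omega
    simp [this]

-- A's arrays after seeding
def pvA1 (sz : Nat) : List Int := (List.replicate sz 0).set 0 1
def pvA2 (m : Int) (sz : Nat) : List Int :=
  (List.range 31).map (fun j : Nat => PySem.Int.band (m >>> ((j : Int)).toNat) 1) ++
    (List.replicate sz 0).drop 31

lemma pvA1_getD (sz : Nat) (hsz : 31 ≤ sz) (j : Nat) (hj : j < 31) :
    (pvA1 sz).getD j 0 = pvS1 j := by
  rw [pvS1_seed j hj]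
  unfold pvA1
  rcases Nat.eq_zero_or_pos j with h0 | h0
  · subst h0
    rw [List.getD_eq_getElem?_getD, List.getElem?_set_self (by simp; omega)]
    simp
  · rw [List.getD_eq_getElem?_getD, List.getElem?_set_ne (by omega)]
    simp only [List.getElem?_replicate]
    rw [if_neg (by omega : ¬ j = 0)]
    split <;> rfl

lemma pvA2_getD (m : Int) (sz : Nat) (j : Nat) (hj : j < 31) :
    (pvA2 m sz).getD j 0 = pvS2 m j := by
  rw [pvS2_seed m j hj]
  unfold pvA2
  rw [List.getD_append _ _ _ _ (by simp [hj]), PySem.List.getD_map_range _ _ _ _ hj]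

lemma pvA1_length (sz : Nat) : (pvA1 sz).length = sz := by simp [pvA1]
lemma pvA2_length (m : Int) (sz : Nat) (hsz : 31 ≤ sz) : (pvA2 m sz).length = sz := by
  simp [pvA2]; omega

-- invariant of A's main loop
lemma pvA_loop (m : Int) (sz : Nat) :
    ∀ k : Nat, 31 + k ≤ sz →
    (let P := (PySem.List.pyRange 0 (k : Int) 1).foldl
      (fun (p : List Int × List Int) n =>
        (p.1.set (n + 31).toNat
           (PySem.Int.mod (PySem.List.pyGetD p.1 (n + 3) 0 + PySem.List.pyGetD p.1 n 0) 2),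
         p.2.set (n + 31).toNat
           (PySem.Int.mod (PySem.List.pyGetD p.2 (n + 3) 0 + PySem.List.pyGetD p.2 (n + 2) 0 +
                           PySem.List.pyGetD p.2 (n + 1) 0 + PySem.List.pyGetD p.2 n 0) 2)))
      (pvA1 sz, pvA2 m sz);
     P.1.length = sz ∧ P.2.length = sz ∧
       (∀ j, j < 31 + k → P.1.getD j 0 = pvS1 j) ∧
       (∀ j, j < 31 + k → P.2.getD j 0 = pvS2 m j)) := by
  intro k
  induction k with
  | zero =>
    intro hk
    rw [PySem.List.pyRange_one_eq_nil (by norm_num)]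
    refine ⟨pvA1_length sz, pvA2_length m sz (by omega), ?_, ?_⟩
    · intro j hj; exact pvA1_getD sz (by omega) j (by omega)
    · intro j hj; exact pvA2_getD m sz j (by omega)
  | succ k ih =>
    intro hk
    obtain ⟨L1, L2, G1, G2⟩ := ih (by omega)
    have hcast : ((k + 1 : Nat) : Int) = (k : Int) + 1 := by push_cast; ring
    rw [hcast, PySem.List.pyRange_one_succ_right (by positivity), List.foldl_append]
    simp only [List.foldl_cons, List.foldl_nil]
    set P := (PySem.List.pyRange 0 (k : Int) 1).foldl
      (fun (p : List Int × List Int) n =>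
        (p.1.set (n + 31).toNat
           (PySem.Int.mod (PySem.List.pyGetD p.1 (n + 3) 0 + PySem.List.pyGetD p.1 n 0) 2),
         p.2.set (n + 31).toNat
           (PySem.Int.mod (PySem.List.pyGetD p.2 (n + 3) 0 + PySem.List.pyGetD p.2 (n + 2) 0 +
                           PySem.List.pyGetD p.2 (n + 1) 0 + PySem.List.pyGetD p.2 n 0) 2)))
      (pvA1 sz, pvA2 m sz) with hP
    have c3 : ((k : Int) + 3) = ((k + 3 : Nat) : Int) := by push_cast; ring
    have c2 : ((k : Int) + 2) = ((k + 2 : Nat) : Int) := by push_cast; ring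
    have c1 : ((k : Int) + 1) = ((k + 1 : Nat) : Int) := by push_cast; ring
    have c31 : ((k : Int) + 31).toNat = k + 31 := by omega
    have r13 : PySem.List.pyGetD P.1 ((k : Int) + 3) 0 = pvS1 (k + 3) := by
      rw [c3, PySem.List.pyGetD_natCast, G1 (k + 3) (by omega)]
    have r10 : PySem.List.pyGetD P.1 (k : Int) 0 = pvS1 k := by
      rw [PySem.List.pyGetD_natCast, G1 k (by omega)]
    have r23 : PySem.List.pyGetD P.2 ((k : Int) + 3) 0 = pvS2 m (k + 3) := by
      rw [c3, PySem.List.pyGetD_natCast, G2 (k + 3) (by omega)]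
    have r22 : PySem.List.pyGetD P.2 ((k : Int) + 2) 0 = pvS2 m (k + 2) := by
      rw [c2, PySem.List.pyGetD_natCast, G2 (k + 2) (by omega)]
    have r21 : PySem.List.pyGetD P.2 ((k : Int) + 1) 0 = pvS2 m (k + 1) := by
      rw [c1, PySem.List.pyGetD_natCast, G2 (k + 1) (by omega)]
    have r20 : PySem.List.pyGetD P.2 (k : Int) 0 = pvS2 m k := by
      rw [PySem.List.pyGetD_natCast, G2 k (by omega)]
    refine ⟨by simp [L1], by simp [L2], ?_, ?_⟩
    · intro j hj
      rw [c31, r13, r10, ← pvS1_rec k]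
      by_cases hje : j = k + 31
      · subst hje
        rw [List.getD_eq_getElem?_getD, List.getElem?_set_self (by omega)]
        simp
      · rw [List.getD_eq_getElem?_getD, List.getElem?_set_ne (by omega),
            ← List.getD_eq_getElem?_getD]
        exact G1 j (by omega)
    · intro j hj
      rw [c31, r23, r22, r21, r20, ← pvS2_rec m k]
      by_cases hje : j = k + 31
      · subst hje
        rw [List.getD_eq_getElem?_getD, List.getElem?_set_self (by omega)]
        simp
      · rw [List.getD_eq_getElem?_getD, List.getElem?_set_ne (by omega),
            ← List.getD_eq_getElem?_getD]
        exact G2 j (by omega)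

lemma pvA_closed (seq_length ci : Int) (hs : -1600 ≤ seq_length) :
    pseudo_random_sequence seq_length ci
      = (List.range seq_length.toNat).map
          (fun j => PySem.Int.mod (pvS1 (1600 + j) + pvS2 (PySem.Int.band ci 0xffffffff) (1600 + j)) 2) := by
  unfold pseudo_random_sequence
  dsimp only
  set m := PySem.Int.band ci 0xffffffff with hm
  set sz := (seq_length + 31 + 1600).toNat with hsz
  have h31 : (31 : Int) = ((31 : Nat) : Int) := by norm_num
  have hseed2 : (PySem.List.pyRange 0 31).foldl
      (fun x2 n => x2.set n.toNat (PySem.Int.band (m >>> n.toNat) 1)) (List.replicate sz 0)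
      = pvA2 m sz := by
    rw [h31, pv_foldl_set (fun n => PySem.Int.band (m >>> n.toNat) 1) 31
          (List.replicate sz 0) (by simp; omega)]
    rfl
  have hseed1 : (List.replicate sz (0:Int)).set 0 1 = pvA1 sz := rfl
  rw [hseed1, hseed2]
  set N := (1600 + seq_length).toNat with hN
  have hrange : (1600 + seq_length) = ((N : Nat) : Int) := by omega
  rw [hrange]
  have hinv := pvA_loop m sz N (by omega)
  set P := (PySem.List.pyRange 0 (N : Int) 1).foldl
      (fun (p : List Int × List Int) n =>
        (p.1.set (n + 31).toNat
           (PySem.Int.mod (PySem.List.pyGetD p.1 (n + 3) 0 + PySem.List.pyGetD p.1 n 0) 2),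
         p.2.set (n + 31).toNat
           (PySem.Int.mod (PySem.List.pyGetD p.2 (n + 3) 0 + PySem.List.pyGetD p.2 (n + 2) 0 +
                           PySem.List.pyGetD p.2 (n + 1) 0 + PySem.List.pyGetD p.2 n 0) 2)))
      (pvA1 sz, pvA2 m sz) with hPdef
  obtain ⟨L1, L2, G1, G2⟩ := hinv
  by_cases hpos : 0 ≤ seq_length
  · have hc : seq_length = ((seq_length.toNat : Nat) : Int) := (Int.toNat_of_nonneg hpos).symm
    rw [hc]
    simp only [Int.toNat_natCast]
    rw [pv_foldl_set _ seq_length.toNat (List.replicate seq_length.toNat 0) (by simp)]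
    simp only [List.drop_replicate, Nat.sub_self, List.replicate_zero, List.append_nil]
    apply List.map_congr_left
    intro j hj
    have hjlt : j < seq_length.toNat := List.mem_range.mp hj
    have cj : ((j : Int) + 1600) = ((1600 + j : Nat) : Int) := by push_cast; ring
    rw [cj, PySem.List.pyGetD_natCast, PySem.List.pyGetD_natCast,
        G1 (1600 + j) (by omega), G2 (1600 + j) (by omega)]
  · rw [PySem.List.pyRange_one_eq_nil (by omega : seq_length ≤ 0)]
    have h0 : seq_length.toNat = 0 := by omega
    simp [h0]

-- ===== VERDICT (by name: the statement is the Claim_ definition above) =====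
theorem pseudo_random_sequence_spec : Claim_equal_pseudo_random_sequence := by
  intro seq ci _ hpre
  unfold Spec_pseudo_random_sequence
  rw [pvA_closed seq ci hpre, pvB_closed]
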